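-- pv_equiv track=rewrite | github.com/momoikik/hw-marjanikteelt | project/project1.py | fun6
-- ===== SOURCE A (Python) =====
-- def fun(dic):   # return the char that apper the most  in the dic
--     list_key = []
--     for n in dic.keys(): #in order to save the key in list/the charector
--         list_key.append(n)
--     max_common_char = 0
--     for v in dic.values():# to know the bigees value
--         if v>max_common_char:
--             max_common_char = v
--     index_key=0
--     for k in dic.values():#the biggess value ,his key show the character that apperd more than the alse character
--         if k!=max_common_char:
--             index_key += 1
--         else:
--             break
--     return list_key[index_key] # return the character that apperd more than the alse character
--
-- def fun6(text_input): #receve the text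
--     dic = {}
--     text_input = text_input.lower()
--     for s in text_input:   #to count howmany times the letter appear in the text
--         if s.isalpha():
--             num = 0
--             for m in text_input: #it checks each letter (check all the charectors)
--                 if s==m:
--                     num += 1
--             dic[s] = num #save the  character in the key and how many times apperd in value
--
--     dic_chars = {}
--     dic_chars[fun(dic)] = "e"     #fun(dic) -- return the most comonr char
--     dic_chars["e"]=fun(dic)
--     dic.pop(fun(dic))      # remove the most common char from the dictionart
--     dic_chars[fun(dic)]= "t"
--     dic_chars["t"]=fun(dic)
--     dic.pop(fun(dic))
--     dic_chars[fun(dic)]= "o"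
--     dic_chars["o"]=fun(dic)
--     dic.pop(fun(dic))
--     dic_chars[fun(dic)]= "r"
--     dic_chars["r"]=fun(dic)
--     dic.pop(fun(dic))
--     return dic_chars
-- ===== SOURCE B (Python) =====
-- def fun6(text_input):
--     text = text_input.lower()
--     counts = {}
--     for s in text:
--         if s.isalpha():
--             counts[s] = counts.get(s, 0) + 1
--     ordered = sorted(counts, key=lambda ch: -counts[ch])
--     dic_chars = {}
--     for i, letter in enumerate("etor"):
--         ch = ordered[i]
--         dic_chars[ch] = letter
--         dic_chars[letter] = ch
--     return dic_chars
-- ===== Notes on version B (the rewrite author's own statement) =====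
-- stated objective: faster
-- what changed: Counts each letter once in a single pass (instead of re-scanning the whole text for every character) and picks the four most frequent letters with one stable sort on -count (instead of four repeated max-scan-and-pop passes over the dict)
import Mathlib
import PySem

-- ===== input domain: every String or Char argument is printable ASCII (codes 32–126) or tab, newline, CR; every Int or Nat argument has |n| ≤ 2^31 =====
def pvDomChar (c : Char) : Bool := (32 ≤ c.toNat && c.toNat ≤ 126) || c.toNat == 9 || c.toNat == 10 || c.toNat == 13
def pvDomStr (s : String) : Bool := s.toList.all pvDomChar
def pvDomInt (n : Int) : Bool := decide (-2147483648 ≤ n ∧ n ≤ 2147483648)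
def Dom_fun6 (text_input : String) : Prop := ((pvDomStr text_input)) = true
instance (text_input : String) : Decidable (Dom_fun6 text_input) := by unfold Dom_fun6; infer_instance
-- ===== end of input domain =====

-- B replaces A's quadratic per-character re-scan and four max-scan-and-pop passes by one
-- counting pass and one stable sort on -count (return value only; A also mutates its local dict).

-- ===== PORT A =====
-- the 'index_key' loop of helper fun: count values until the first one equal to mx ('break')
def fun6_indexLoop (vals : List Int) (mx : Int) : Nat :=
  match vals with
  | [] => 0
  | k :: t => if k ≠ mx then fun6_indexLoop t mx + 1 else 0

-- helper fun(dic) of A: the key of the first maximal value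
def fun6_fun (dic : PySem.Dict String Int) : String :=
  let list_key := dic.keys
  let max_common_char := dic.values.foldl (fun m v => if v > m then v else m) 0
  let index_key := fun6_indexLoop dic.values max_common_char
  (PySem.List.pyGet? list_key (index_key : Int)).getD ""  -- IndexError (empty dict) lies outside Pre_

def fun6 (text_input : String) : List (String × String) :=
  let t := (PySem.Str.lower text_input).toList
  let dic := t.foldl (fun d s =>
      if PySem.Chars.isalpha s then
        d.insert (String.ofList [s]) (t.foldl (fun num m => if s = m then num + 1 else num) (0 : Int))
      else d) PySem.Dict.empty
  let c1 := fun6_fun dic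
  let dic_chars := (PySem.Dict.empty.insert c1 "e").insert "e" c1
  let dic := dic.erase c1
  let c2 := fun6_fun dic
  let dic_chars := (dic_chars.insert c2 "t").insert "t" c2
  let dic := dic.erase c2
  let c3 := fun6_fun dic
  let dic_chars := (dic_chars.insert c3 "o").insert "o" c3
  let dic := dic.erase c3
  let c4 := fun6_fun dic
  let dic_chars := (dic_chars.insert c4 "r").insert "r" c4
  dic_chars.items

-- ===== PORT B =====
def fun6_alt (text_input : String) : List (String × String) :=
  let t := (PySem.Str.lower text_input).toList
  let counts := t.foldl (fun d s =>
      if PySem.Chars.isalpha s then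
        d.insert (String.ofList [s]) (d.getD (String.ofList [s]) 0 + 1)
      else d) PySem.Dict.empty
  let ordered := PySem.List.sorted counts.keys (fun ch => -(counts.getD ch 0)) false
  let dic_chars := (PySem.List.enumerate ["e", "t", "o", "r"] 0).foldl
      (fun dc p =>
        let ch := (PySem.List.pyGet? ordered p.1).getD ""  -- IndexError (fewer than 4 letters) outside Pre_
        (dc.insert ch p.2).insert p.2 ch) PySem.Dict.empty
  dic_chars.items

-- ===== PRECONDITION & SPEC =====
-- Pre_: the lowercased text contains at least four distinct letters; on fewer, A's helper fun
-- indexes an exhausted dict and raises IndexError (B's ordered[i] raises IndexError as well).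
def Pre_fun6 (text_input : String) : Prop :=
  4 ≤ (PySem.Set.ofList (((PySem.Str.lower text_input).toList.filter
        PySem.Chars.isalpha).map (fun c => String.ofList [c]))).length
instance (text_input : String) : Decidable (Pre_fun6 text_input) := by unfold Pre_fun6; infer_instance
def pvWitness_fun6 : String := "Rotor Feet"

def Spec_fun6 (text_input : String) (out : List (String × String)) : Prop := out = fun6_alt text_input
instance (text_input : String) (out : List (String × String)) : Decidable (Spec_fun6 text_input out) := by unfold Spec_fun6; infer_instance

-- ===== CLAIM (what is proved, stated in full; the proofs are below) =====
def Claim_equal_fun6 : Prop := ∀ (text_input : String), Dom_fun6 text_input → Pre_fun6 text_input → Spec_fun6 text_input (fun6 text_input)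

-- ===== LEMMAS AND PROOFS =====

theorem pv_items_foldl_insert_const (l : List String) (f : String → Int) :
    ((l.foldl (fun d k => d.insert k (f k)) PySem.Dict.empty).items)
      = (PySem.Set.ofList l).map (fun k => (k, f k)) := by
  induction l using List.reverseRecOn with
  | nil => rfl
  | append_singleton l x ih =>
    rw [List.foldl_append, List.foldl_cons, List.foldl_nil, PySem.Set.ofList_append_singleton,
      PySem.Dict.items_insert]
    have hkeys : (l.foldl (fun d k => d.insert k (f k)) PySem.Dict.empty).keys
        = PySem.Set.ofList l := by
      rw [PySem.Dict.keys_foldl_insert (f := fun _ k => f k)]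
      simp [PySem.Dict.keys_empty, PySem.Set.update_nil_left]
    rw [PySem.Dict.contains_eq_decide_mem_keys, hkeys]
    by_cases hx : x ∈ PySem.Set.ofList l
    · simp only [hx, decide_true, if_true, ih, PySem.Set.add_of_mem hx, List.map_map]
      apply List.map_congr_left
      intro k _
      by_cases hk : k = x
      · subst hk; simp
      · simp [Function.comp, hk]
    · simp [hx, ih]

theorem pv_dicB_eq_counter (t : List Char) :
    (t.foldl (fun d s =>
      if PySem.Chars.isalpha s then
        d.insert (String.ofList [s]) (d.getD (String.ofList [s]) 0 + 1)
      else d) PySem.Dict.empty)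
      = PySem.Dict.counter ((t.filter PySem.Chars.isalpha).map (fun c => String.ofList [c])) := by
  rw [PySem.List.foldl_if_eq_foldl_filter, ← PySem.Dict.foldl_insert_getD_add_one_eq_counter,
    List.foldl_map]

theorem pv_dicA_eq_counter (t : List Char) :
    (t.foldl (fun d s =>
      if PySem.Chars.isalpha s then
        d.insert (String.ofList [s]) (t.foldl (fun num m => if s = m then num + 1 else num) (0 : Int))
      else d) PySem.Dict.empty)
      = PySem.Dict.counter ((t.filter PySem.Chars.isalpha).map (fun c => String.ofList [c])) := by
  have hinj : Function.Injective (fun c => String.ofList [c]) := by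
    intro a b h
    simpa using congrArg String.toList h
  rw [PySem.List.foldl_if_eq_foldl_filter]
  have hcong : (t.filter PySem.Chars.isalpha).foldl (fun d s =>
        d.insert (String.ofList [s]) (t.foldl (fun num m => if s = m then num + 1 else num) (0 : Int)))
        PySem.Dict.empty
      = (t.filter PySem.Chars.isalpha).foldl (fun d s =>
        d.insert (String.ofList [s])
          ((((t.filter PySem.Chars.isalpha).map (fun c => String.ofList [c])).count (String.ofList [s]) : Int)))
        PySem.Dict.empty := by
    apply PySem.List.foldl_congr_mem
    intro acc s hs
    congr 1
    have h1 : t.foldl (fun num m => if s = m then num + 1 else num) (0 : Int)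
        = t.foldl (fun num m => if m == s then num + 1 else num) (0 : Int) := by
      apply PySem.List.foldl_congr_mem
      intro acc m _
      by_cases h : s = m
      · subst h; simp
      · simp [h, Ne.symm h]
    rw [h1, PySem.List.foldl_beq_add_one, zero_add,
      List.count_map_of_injective _ _ hinj,
      List.count_filter (List.mem_filter.mp hs).2]
  rw [hcong]
  have hmap := List.foldl_map (f := fun c => String.ofList [c])
    (g := fun (d : PySem.Dict String Int) k => d.insert k
      ((((t.filter PySem.Chars.isalpha).map (fun c => String.ofList [c])).count k : Int)))
    (l := t.filter PySem.Chars.isalpha) (init := PySem.Dict.empty)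
  refine Eq.trans hmap.symm ?_
  apply PySem.Dict.ext
  rw [pv_items_foldl_insert_const, PySem.Dict.items_counter]

theorem pv_insertBy_front (g : String → Int) (x : String) (S : List String)
    (h : ∀ y ∈ S, g x < g y) :
    PySem.List.insertBy (fun a b => decide (g a < g b)) x S = x :: S := by
  cases S with
  | nil => simp [PySem.List.insertBy]
  | cons y ys => simp [PySem.List.insertBy, h y (by simp)]

theorem pv_sorted_snoc (g : String → Int) (l : List String) (x : String) :
    PySem.List.sorted (l ++ [x]) g false
      = PySem.List.insertBy (fun a b => decide (g a < g b)) x (PySem.List.sorted l g false) := by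
  simp [PySem.List.sorted_eq_foldl_insertBy, List.foldl_append]

theorem pv_sorted_cons_of_firstMin (g : String → Int) (as bs : List String) (m : String)
    (h1 : ∀ a ∈ as, g m < g a) (h2 : ∀ b ∈ bs, g m ≤ g b) :
    PySem.List.sorted (as ++ m :: bs) g false
      = m :: PySem.List.sorted (as ++ bs) g false := by
  induction bs using List.reverseRecOn with
  | nil =>
    rw [show as ++ [m] = as ++ [m] from rfl, pv_sorted_snoc, List.append_nil]
    apply pv_insertBy_front
    intro y hy
    exact h1 y (((PySem.List.mem_sorted _ _ _ _).mp hy))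
  | append_singleton bs x ih =>
    have hx : g m ≤ g x := h2 x (by simp)
    have h2' : ∀ b ∈ bs, g m ≤ g b := fun b hb => h2 b (by simp [hb])
    have e1 : as ++ m :: (bs ++ [x]) = (as ++ m :: bs) ++ [x] := by simp
    have e2 : as ++ (bs ++ [x]) = (as ++ bs) ++ [x] := by simp
    rw [e1, e2, pv_sorted_snoc, ih h2', pv_sorted_snoc]
    have hbefore : (fun a b => decide (g a < g b)) x m = false := by
      simp; omega
    cases hS : PySem.List.sorted (as ++ bs) g false with
    | nil => simp [PySem.List.insertBy, hbefore]
      -- insertBy x (m :: []) = if before x m then .. else m :: insertBy x []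
    | cons z zs => simp [PySem.List.insertBy, hbefore]

theorem pv_indexLoop_eq_findIdx (vals : List Int) (mx : Int) :
    fun6_indexLoop vals mx = vals.findIdx (· == mx) := by
  induction vals with
  | nil => rfl
  | cons k t ih =>
    by_cases h : k = mx
    · simp [fun6_indexLoop, h, List.findIdx_cons]
    · have hb : (k == mx) = false := beq_eq_false_iff_ne.mpr h
      simp [fun6_indexLoop, h, List.findIdx_cons, ih, hb]

theorem pv_step (K : List String) (f : String → Int) (d : PySem.Dict String Int)
    (hitems : d.items = K.map (fun k => (k, f k)))
    (hnd : K.Nodup) (hne : K ≠ []) (hpos : ∀ k ∈ K, 1 ≤ f k) :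
    fun6_fun d ∈ K ∧
    PySem.List.sorted K (fun ch => -(f ch)) false
      = fun6_fun d :: PySem.List.sorted (K.erase (fun6_fun d)) (fun ch => -(f ch)) false ∧
    (d.erase (fun6_fun d)).items = (K.erase (fun6_fun d)).map (fun k => (k, f k)) := by
  have hkeys : d.keys = K := by
    simp only [PySem.Dict.keys, hitems, List.map_map]
    exact List.map_id K
  have hvals : d.values = K.map f := by
    simp only [PySem.Dict.values, hitems, List.map_map]
    exact List.map_congr_left (fun k _ => rfl)
  have hmaxstep : d.values.foldl (fun m v => if v > m then v else m) 0
      = K.foldl (fun acc y => max acc (f y)) 0 := by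
    rw [hvals, List.foldl_map]
    apply PySem.List.foldl_congr_mem
    intro acc y _
    rcases lt_or_ge acc (f y) with h | h
    · simp [max_def]; omega
    · simp [max_def]; omega
  set M := K.foldl (fun acc y => max acc (f y)) 0 with hM
  have hub : ∀ k ∈ K, f k ≤ M := (PySem.List.le_foldl_max_int K f 0).2
  have hM1 : 1 ≤ M := by
    obtain ⟨k0, hk0⟩ := List.exists_mem_of_ne_nil K hne
    exact le_trans (hpos k0 hk0) (hub k0 hk0)
  have hmem : M ∈ K.map f := by
    have := PySem.List.foldl_max_mem (K.map f) 0
    rw [List.foldl_map] at this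
    rcases this with h | h
    · omega
    · exact h
  have hlt' : (K.map f).findIdx (· == M) < (K.map f).length :=
    List.findIdx_lt_length.mpr ⟨M, hmem, by simp⟩
  have hlt : (K.map f).findIdx (· == M) < K.length := by simpa using hlt'
  have hfm : f (K[(K.map f).findIdx (· == M)]'hlt) = M := by
    have h0 := List.findIdx_getElem (w := hlt')
    rw [List.getElem_map] at h0
    exact beq_iff_eq.mp h0
  have hbefore : ∀ j (hj : j < (K.map f).findIdx (· == M)),
      f (K[j]'(lt_trans hj hlt)) ≠ M := by
    intro j hj
    have h0 := List.not_of_lt_findIdx (p := (· == M)) (xs := K.map f) hj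
    rw [List.getElem_map] at h0
    simpa using h0
  have hvm : d.values.foldl (fun m v => if v > m then v else m) 0 = M := hmaxstep
  set idx := (K.map f).findIdx (· == M) with hidx
  have hm_eq : fun6_fun d = K[idx]'hlt := by
    simp only [fun6_fun, pv_indexLoop_eq_findIdx]
    rw [hvm, hkeys, hvals, ← hidx, PySem.List.pyGet?_natCast, List.getElem?_eq_getElem hlt]
    rfl
  set m := K[idx]'hlt with hmdef
  have hmK : m ∈ K := List.getElem_mem hlt
  -- decomposition K = take idx ++ m :: drop (idx+1)
  have hdecomp : K = K.take idx ++ m :: K.drop (idx + 1) := by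
    rw [hmdef]
    rw [List.getElem_cons_drop hlt]
    exact (List.take_append_drop idx K).symm
  have htake : ∀ a ∈ K.take idx, f a < f m := by
    intro a ha
    obtain ⟨j, hj, rfl⟩ := List.getElem_of_mem ha
    have hjlen : j < idx := lt_of_lt_of_le hj (by simp [List.length_take])
    have heq : (K.take idx)[j]'hj = K[j]'(lt_trans hjlen hlt) := List.getElem_take
    rw [heq]
    have hne' : f (K[j]'(lt_trans hjlen hlt)) ≠ M := hbefore j hjlen
    have hle : f (K[j]'(lt_trans hjlen hlt)) ≤ M := hub _ (List.getElem_mem _)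
    have hfm2 := hfm
    omega
  have hdropb : ∀ b ∈ K.drop (idx + 1), f b ≤ f m := by
    intro b hb
    rw [hfm]
    exact hub b (List.mem_of_mem_drop hb)
  have hnotmemtake : m ∉ K.take idx := by
    have h0 := hnd
    rw [hdecomp] at h0
    intro hmem'
    exact ((List.nodup_append.mp h0).2.2 m hmem' m (List.mem_cons_self ..)) rfl
  have herase : K.erase m = K.take idx ++ K.drop (idx + 1) := by
    conv_lhs => rw [hdecomp]
    rw [List.erase_append_right _ hnotmemtake, List.erase_cons_head]
  have hsorted : PySem.List.sorted K (fun ch => -(f ch)) false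
      = m :: PySem.List.sorted (K.erase m) (fun ch => -(f ch)) false := by
    conv_lhs => rw [hdecomp]
    rw [herase]
    apply pv_sorted_cons_of_firstMin
    · intro a ha
      have := htake a ha
      omega
    · intro b hb
      have := hdropb b hb
      omega
  have heraseitems : (d.erase m).items = (K.erase m).map (fun k => (k, f k)) := by
    show List.filter (fun p => !p.1 == m) d.items = _
    rw [hitems, List.filter_map, List.Nodup.erase_eq_filter hnd m]
    rfl
  exact ⟨hm_eq ▸ hmK, hm_eq ▸ hsorted, hm_eq ▸ heraseitems⟩

theorem pv_pyGet4 (a b c d : String) (rest : List String) :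
    ((PySem.List.pyGet? (a::b::c::d::rest) (0:Int)).getD "" = a) ∧
    ((PySem.List.pyGet? (a::b::c::d::rest) (1:Int)).getD "" = b) ∧
    ((PySem.List.pyGet? (a::b::c::d::rest) (2:Int)).getD "" = c) ∧
    ((PySem.List.pyGet? (a::b::c::d::rest) (3:Int)).getD "" = d) := by
  refine ⟨?_, ?_, ?_, ?_⟩ <;>
  · simp only [PySem.List.pyGet?, PySem.List.pyIdx?]
    split
    · split
      · simp
      · simp_all
        omega
    · simp_all

-- ===== VERDICT (by name: the statement is the Claim_ definition above) =====
-- the common final insert chain of both programs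
def pv_chain (c1 c2 c3 c4 : String) : List (String × String) :=
  ((((((((PySem.Dict.empty.insert c1 "e").insert "e" c1).insert c2 "t").insert
      "t" c2).insert c3 "o").insert "o" c3).insert c4 "r").insert "r" c4).items

set_option maxHeartbeats 1000000 in
theorem fun6_spec : Claim_equal_fun6 := by
  intro text _ hpre
  show fun6 text = fun6_alt text
  set t := (PySem.Str.lower text).toList with ht
  set letters := (t.filter PySem.Chars.isalpha).map (fun c => String.ofList [c]) with hletters
  set f : String → Int := fun k => (letters.count k : Int) with hf
  set K0 := PySem.Set.ofList letters with hK0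
  set d0 := PySem.Dict.counter letters with hd0
  set c1 := fun6_fun d0 with hc1
  set c2 := fun6_fun (d0.erase c1) with hc2
  set c3 := fun6_fun ((d0.erase c1).erase c2) with hc3
  set c4 := fun6_fun (((d0.erase c1).erase c2).erase c3) with hc4
  have hg : (fun ch => -(d0.getD ch 0)) = fun ch => -(f ch) := by
    funext ch
    rw [hd0, PySem.Dict.getD_counter]
  have hlen0 : 4 ≤ K0.length := hpre
  have hnd0 : K0.Nodup := PySem.Set.nodup_ofList letters
  have hpos0 : ∀ k ∈ K0, 1 ≤ f k := by
    intro k hk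
    have hmem : k ∈ letters := (PySem.Set.mem_ofList letters k).mp hk
    have hc : 0 < letters.count k := List.count_pos_iff.mpr hmem
    show (1 : Int) ≤ (letters.count k : Int)
    exact_mod_cast hc
  have hitems0 : d0.items = K0.map (fun k => (k, f k)) := PySem.Dict.items_counter letters
  obtain ⟨hm1, hs1, hi1⟩ := pv_step K0 f d0 hitems0 hnd0
    (by intro h; rw [h] at hlen0; simp at hlen0) hpos0
  set K1 := K0.erase c1 with hK1
  have hlen1 : K1.length = K0.length - 1 := List.length_erase_of_mem hm1
  have hnd1 : K1.Nodup := hnd0.erase c1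
  have hpos1 : ∀ k ∈ K1, 1 ≤ f k := fun k hk => hpos0 k (List.mem_of_mem_erase hk)
  obtain ⟨hm2, hs2, hi2⟩ := pv_step K1 f (d0.erase c1) hi1 hnd1
    (by intro h; rw [h] at hlen1; simp at hlen1; omega) hpos1
  set K2 := K1.erase c2 with hK2
  have hlen2 : K2.length = K1.length - 1 := List.length_erase_of_mem hm2
  have hnd2 : K2.Nodup := hnd1.erase c2
  have hpos2 : ∀ k ∈ K2, 1 ≤ f k := fun k hk => hpos1 k (List.mem_of_mem_erase hk)
  obtain ⟨hm3, hs3, hi3⟩ := pv_step K2 f ((d0.erase c1).erase c2) hi2 hnd2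
    (by intro h; rw [h] at hlen2; simp at hlen2; omega) hpos2
  set K3 := K2.erase c3 with hK3
  have hlen3 : K3.length = K2.length - 1 := List.length_erase_of_mem hm3
  have hnd3 : K3.Nodup := hnd2.erase c3
  have hpos3 : ∀ k ∈ K3, 1 ≤ f k := fun k hk => hpos2 k (List.mem_of_mem_erase hk)
  obtain ⟨hm4, hs4, hi4⟩ := pv_step K3 f (((d0.erase c1).erase c2).erase c3) hi3 hnd3
    (by intro h; rw [h] at hlen3; simp at hlen3; omega) hpos3
  have hsorted : PySem.List.sorted K0 (fun ch => -(f ch)) false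
      = c1 :: c2 :: c3 :: c4 :: PySem.List.sorted (K3.erase c4) (fun ch => -(f ch)) false := by
    rw [hs1, hs2, hs3, hs4]
  have haveA : fun6 text = pv_chain c1 c2 c3 c4 := by
    simp only [fun6, pv_chain]
    rw [pv_dicA_eq_counter]
  have haveB : fun6_alt text = pv_chain c1 c2 c3 c4 := by
    simp only [fun6_alt, pv_chain]
    rw [pv_dicB_eq_counter]
    rw [show (PySem.Dict.counter letters).keys = K0 from PySem.Dict.keys_counter letters, hg,
      hsorted]
    simp only [PySem.List.enumerate_cons, PySem.List.enumerate_nil,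
      List.foldl_cons, List.foldl_nil]
    rw [(pv_pyGet4 c1 c2 c3 c4 _).1]
    rw [show ((0:Int)+1) = (1:Int) from rfl, (pv_pyGet4 c1 c2 c3 c4 _).2.1]
    rw [show ((1:Int)+1) = (2:Int) from rfl, (pv_pyGet4 c1 c2 c3 c4 _).2.2.1]
    rw [show ((2:Int)+1) = (3:Int) from rfl, (pv_pyGet4 c1 c2 c3 c4 _).2.2.2]
  rw [haveA, haveB]
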